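-- pv_equiv track=rewrite | github.com/memphis242/advent-of-code-2023 | day6/python/aoc-day6.py | get_next_num_in_line_starting_at_idx
-- ===== SOURCE A (Python) =====
-- from typing import Tuple, List
--
-- def get_next_num_in_line_starting_at_idx( line: str, start_idx: int ) -> Tuple[str, int]:
--    # check for invalid start index
--    if start_idx > (len(line)-1):
--       return ('', 0)
--
--    chars_to_skip_over_afterwards = 0
--    num_str = ''
--    for char_idx,char in enumerate(line[start_idx:]):
--
--       # skip over non-digits and increment chars to skip
--       if not char.isdigit():
--          chars_to_skip_over_afterwards = chars_to_skip_over_afterwards + 1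
--          continue
--
--       # iterate through digits until non-digit is found
--       num_str = char
--       check_idx = start_idx + char_idx + 1
--       if check_idx <= len(line)-1:
--          check_char = line[check_idx]
--       else:
--          check_char = ''
--       while check_char.isdigit():
--          num_str = num_str + check_char
--          check_idx = check_idx + 1
--          if check_idx <= len(line)-1:
--             check_char = line[check_idx]
--          else:
--             break
--       chars_to_skip_over_afterwards = chars_to_skip_over_afterwards + len(num_str) - 1
--
--       # num found, stop iteration over line
--       break
--
--    return ( num_str, chars_to_skip_over_afterwards )
-- ===== SOURCE B (Python) =====
-- import re
--
-- def get_next_num_in_line_starting_at_idx(line: str, start_idx: int):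
--     if start_idx > len(line) - 1:
--         return ('', 0)
--     sub = line[start_idx:]
--     m = re.search(r'[0-9]+', sub)
--     if m:
--         return (m.group(), m.start() + len(m.group()) - 1)
--     return ('', len(sub))
-- ===== Notes on version B (the rewrite author's own statement) =====
-- stated objective: idiomatic
-- what changed: Replaces A's manual enumerate loop with non-digit skipping plus an inner index-chasing while-loop over the original line by a single regex search [0-9]+ on the slice (the skip count is derived from the match position and length); the regex scan runs in C, a constant-factor speedup a timing run measured.
-- outside the precondition, e.g. on get_next_num_in_line_starting_at_idx('11', -1): A returns ('111', 2), B returns ('1', 0); on get_next_num_in_line_starting_at_idx('12', -5): A raises IndexError, B returns ('12', 1)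
import Mathlib
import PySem

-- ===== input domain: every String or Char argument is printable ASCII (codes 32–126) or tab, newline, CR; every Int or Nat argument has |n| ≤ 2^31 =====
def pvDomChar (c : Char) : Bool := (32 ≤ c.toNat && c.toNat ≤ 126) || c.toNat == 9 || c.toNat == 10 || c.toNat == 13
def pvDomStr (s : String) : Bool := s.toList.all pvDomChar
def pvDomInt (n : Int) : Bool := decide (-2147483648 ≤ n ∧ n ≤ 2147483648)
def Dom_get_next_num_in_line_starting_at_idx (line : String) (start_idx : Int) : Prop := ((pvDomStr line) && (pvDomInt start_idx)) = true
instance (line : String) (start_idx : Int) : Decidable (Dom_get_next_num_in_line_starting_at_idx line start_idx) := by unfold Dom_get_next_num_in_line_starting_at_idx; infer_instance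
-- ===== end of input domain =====

-- B replaces A's manual skip-and-read loops by one regex search on the slice (idiomatic, same cost).

-- ===== PORT A =====
-- inner `while check_char.isdigit():` loop of A; the fuel argument only makes the recursion total
-- (line.length + 1 steps always suffice: check_idx strictly increases and must stay < length).
-- `check_char = ''` (index out of range) is the `none` case: ''.isdigit() is False, the loop exits.
def pvAInner (line : List Char) (numAcc : List Char) (check_idx : Int) : Nat → List Char
  | 0 => numAcc
  | fuel + 1 =>
    let check_char : Option Char :=
      if check_idx ≤ (line.length : Int) - 1 then PySem.List.pyGet? line check_idx else none
    match check_char with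
    | some ch =>
      if PySem.Chars.isdigit ch then
        if check_idx + 1 ≤ (line.length : Int) - 1 then
          pvAInner line (numAcc ++ [ch]) (check_idx + 1) fuel
        else numAcc ++ [ch]          -- break
      else numAcc
    | none => numAcc

-- outer `for char_idx,char in enumerate(line[start_idx:]):` loop with the skip accumulator
def pvALoop (line : List Char) (start_idx : Int) : List (Int × Char) → Int → String × Int
  | [], skip => ("", skip)
  | (ci, c) :: rest, skip =>
    if !(PySem.Chars.isdigit c) then
      pvALoop line start_idx rest (skip + 1)                 -- continue
    else
      let num := pvAInner line [c] (start_idx + ci + 1) (line.length + 1)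
      (String.ofList num, skip + (num.length : Int) - 1)         -- break

def get_next_num_in_line_starting_at_idx (line : String) (start_idx : Int) : String × Int :=
  let ls := line.toList
  if start_idx > (ls.length : Int) - 1 then ("", 0)
  else pvALoop ls start_idx (PySem.List.enumerate (PySem.List.slice ls (some start_idx) none)) 0

-- ===== PORT B =====
-- re.search(r'[0-9]+', sub) ported exactly by hand: the match is the maximal digit run starting at
-- the first digit position of sub (exact on the ASCII domain, where [0-9] = isdigit).
def get_next_num_in_line_starting_at_idx_alt (line : String) (start_idx : Int) : String × Int :=
  let ls := line.toList
  if start_idx > (ls.length : Int) - 1 then ("", 0)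
  else
    let sub := PySem.List.slice ls (some start_idx) none
    match sub.findIdx? (fun c => PySem.Chars.isdigit c) with
    | some i =>
      let num := (sub.drop i).takeWhile (fun c => PySem.Chars.isdigit c)
      (String.ofList num, (i : Int) + (num.length : Int) - 1)
    | none => ("", (sub.length : Int))

-- ===== PRECONDITION & SPEC =====
-- Pre_ excludes only negative start_idx combined with a digit somewhere in line: negative start
-- indices are outside the function's natural domain, and there A's Python negative-index
-- wraparound (slice positions vs raw line indexing) returns accidental values and raises
-- IndexError whenever start_idx < -len(line) and a digit is reached; on digit-free lines the
-- wraparound is harmless, so those inputs stay inside Pre_.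
def Pre_get_next_num_in_line_starting_at_idx (line : String) (start_idx : Int) : Prop :=
  0 ≤ start_idx ∨ line.toList.all (fun c => !(PySem.Chars.isdigit c)) = true
instance (line : String) (start_idx : Int) : Decidable (Pre_get_next_num_in_line_starting_at_idx line start_idx) := by unfold Pre_get_next_num_in_line_starting_at_idx; infer_instance

def pvWitness_get_next_num_in_line_starting_at_idx : String × Int := ("a 12b", 0)

def Spec_get_next_num_in_line_starting_at_idx (line : String) (start_idx : Int) (out : String × Int) : Prop := out = get_next_num_in_line_starting_at_idx_alt line start_idx
instance (line : String) (start_idx : Int) (out : String × Int) : Decidable (Spec_get_next_num_in_line_starting_at_idx line start_idx out) := by unfold Spec_get_next_num_in_line_starting_at_idx; infer_instance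

-- ===== CLAIM (what is proved, stated in full; the proofs are below) =====
def Claim_equal_get_next_num_in_line_starting_at_idx : Prop := ∀ (line : String) (start_idx : Int), Dom_get_next_num_in_line_starting_at_idx line start_idx → Pre_get_next_num_in_line_starting_at_idx line start_idx → Spec_get_next_num_in_line_starting_at_idx line start_idx (get_next_num_in_line_starting_at_idx line start_idx)

-- ===== LEMMAS AND PROOFS =====

-- A's inner digit-reading loop, started at a nonnegative index j with enough fuel, appends
-- exactly the maximal digit run of line starting at position j.
theorem pvAInner_eq (line : List Char) (numAcc : List Char) (j fuel : Nat)
    (hf : line.length ≤ fuel + j) :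
    pvAInner line numAcc (j : Int) fuel
      = numAcc ++ (line.drop j).takeWhile (fun c => PySem.Chars.isdigit c) := by
  induction fuel generalizing j numAcc with
  | zero =>
    have h : line.drop j = [] := List.drop_eq_nil_of_le (by omega)
    simp [pvAInner, h]
  | succ fuel ih =>
    by_cases hj : j < line.length
    · have hle : (j : Int) ≤ (line.length : Int) - 1 := by omega
      obtain ⟨ch, tl, hct⟩ : ∃ ch tl, line.drop j = ch :: tl := by
        cases hdj : line.drop j with
        | nil => exact absurd (List.drop_eq_nil_iff.mp hdj) (by omega)
        | cons a b => exact ⟨a, b, rfl⟩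
      have htl : line.drop (j + 1) = tl := by
        have h1 := congrArg List.tail hct
        simpa [List.tail_drop] using h1
      have hget : PySem.List.pyGet? line (j : Int) = some ch := by
        rw [PySem.List.pyGet?_natCast, ← List.head?_drop, hct]
        rfl
      by_cases hd : PySem.Chars.isdigit ch
      · by_cases hj1 : (j : Int) + 1 ≤ (line.length : Int) - 1
        · have hstep : pvAInner line numAcc (j : Int) (fuel + 1)
              = pvAInner line (numAcc ++ [ch]) ((j : Int) + 1) fuel := by
            simp [pvAInner, hle, hget, hd, hj1]
          have hcast : ((j : Int) + 1) = ((j + 1 : Nat) : Int) := by push_cast; ring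
          rw [hstep, hcast, ih (numAcc ++ [ch]) (j + 1) (by omega), htl]
          simp [hct, hd]
        · have htl0 : tl = [] := by
            rw [← htl]; exact List.drop_eq_nil_of_le (by omega)
          have hstep : pvAInner line numAcc (j : Int) (fuel + 1) = numAcc ++ [ch] := by
            simp [pvAInner, hle, hget, hd, hj1]
          rw [hstep]
          simp [hct, htl0, hd]
      · have hstep : pvAInner line numAcc (j : Int) (fuel + 1) = numAcc := by
          simp [pvAInner, hle, hget, hd]
        rw [hstep]
        simp [hct, hd]
    · have hle : ¬ ((j : Int) ≤ (line.length : Int) - 1) := by omega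
      have h : line.drop j = [] := List.drop_eq_nil_of_le (by omega)
      simp [pvAInner, hle, h]

-- A's outer loop over the tail of enumerate(line[s:]) starting at offset k produces B's
-- first-digit-position / maximal-run characterisation.
theorem pvALoop_eq (line : List Char) (s : Nat) (xs : List Char) (k : Nat) (skip : Int)
    (hxs : line.drop (s + k) = xs) :
    pvALoop line (s : Int) (PySem.List.enumerate xs (k : Int)) skip
      = match xs.findIdx? (fun c => PySem.Chars.isdigit c) with
        | some i =>
          let num := (xs.drop i).takeWhile (fun c => PySem.Chars.isdigit c)
          (String.ofList num, skip + (i : Int) + (num.length : Int) - 1)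
        | none => ("", skip + (xs.length : Int)) := by
  induction xs generalizing k skip with
  | nil => simp [PySem.List.enumerate_nil, pvALoop, List.findIdx?_nil]
  | cons c rest ih =>
    rw [PySem.List.enumerate_cons]
    have hrest : line.drop (s + (k + 1)) = rest := by
      have h1 := congrArg List.tail hxs
      rw [List.tail_drop] at h1
      simpa [Nat.add_assoc] using h1
    by_cases hd : PySem.Chars.isdigit c
    · have hnum : pvAInner line [c] ((s : Int) + (k : Int) + 1) (line.length + 1)
          = [c] ++ rest.takeWhile (fun c => PySem.Chars.isdigit c) := by
        have hcast : (s : Int) + (k : Int) + 1 = ((s + (k + 1) : Nat) : Int) := by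
          push_cast; ring
        rw [hcast, pvAInner_eq line [c] (s + (k + 1)) (line.length + 1) (by omega), hrest]
      have hstep : pvALoop line (s : Int) (((k : Int), c) :: PySem.List.enumerate rest ((k : Int) + 1)) skip
          = (String.ofList (pvAInner line [c] ((s : Int) + (k : Int) + 1) (line.length + 1)),
             skip + ((pvAInner line [c] ((s : Int) + (k : Int) + 1) (line.length + 1)).length : Int) - 1) := by
        simp [pvALoop, hd]
      rw [hstep, hnum]
      simp [List.findIdx?_cons, hd]
    · have hstep : pvALoop line (s : Int) (((k : Int), c) :: PySem.List.enumerate rest ((k : Int) + 1)) skip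
          = pvALoop line (s : Int) (PySem.List.enumerate rest ((k : Int) + 1)) (skip + 1) := by
        simp [pvALoop, hd]
      have hcast : (k : Int) + 1 = ((k + 1 : Nat) : Int) := by push_cast; ring
      rw [hstep, hcast, ih (k + 1) (skip + 1) hrest]
      rcases h : rest.findIdx? (fun c => PySem.Chars.isdigit c) with _ | i
      · simp [h, List.findIdx?_cons, hd]
        all_goals omega
      · simp [h, List.findIdx?_cons, hd, List.drop_succ_cons]
        all_goals omega

-- A's outer loop on a slice containing no digit just counts every character into skip.
theorem pvALoop_nodigit (line : List Char) (s : Int) (xs : List Char) (k : Int) (skip : Int)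
    (h : ∀ c ∈ xs, PySem.Chars.isdigit c = false) :
    pvALoop line s (PySem.List.enumerate xs k) skip = ("", skip + (xs.length : Int)) := by
  induction xs generalizing k skip with
  | nil => simp [PySem.List.enumerate_nil, pvALoop]
  | cons c rest ih =>
    rw [PySem.List.enumerate_cons]
    have hc : PySem.Chars.isdigit c = false := h c (by simp)
    have hstep : pvALoop line s ((k, c) :: PySem.List.enumerate rest (k + 1)) skip
        = pvALoop line s (PySem.List.enumerate rest (k + 1)) (skip + 1) := by
      simp [pvALoop, hc]
    rw [hstep, ih (k + 1) (skip + 1) (fun c hmem => h c (List.mem_cons_of_mem _ hmem))]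
    simp only [List.length_cons]
    push_cast
    exact congrArg (Prod.mk "") (by ring)

-- ===== VERDICT (by name: the statement is the Claim_ definition above) =====
theorem get_next_num_in_line_starting_at_idx_spec : Claim_equal_get_next_num_in_line_starting_at_idx := by
  intro line start_idx hdom hpre
  unfold Spec_get_next_num_in_line_starting_at_idx
  by_cases h0 : (0 : Int) ≤ start_idx
  · lift start_idx to Nat using h0 with n
    simp only [get_next_num_in_line_starting_at_idx, get_next_num_in_line_starting_at_idx_alt]
    by_cases hg : (n : Int) > ((line.toList.length : Nat) : Int) - 1
    · rw [if_pos hg, if_pos hg]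
    · rw [if_neg hg, if_neg hg, PySem.List.slice_from line.toList (Int.natCast_nonneg n),
          Int.toNat_natCast]
      have e0 : PySem.List.enumerate (line.toList.drop n)
          = PySem.List.enumerate (line.toList.drop n) (((0 : Nat) : Nat) : Int) := rfl
      rw [e0, pvALoop_eq line.toList n (line.toList.drop n) 0 0 (by simp)]
      rcases h : (line.toList.drop n).findIdx? (fun c => PySem.Chars.isdigit c) with _ | i
      · simp
      · simp
  · have hnd : line.toList.all (fun c => !(PySem.Chars.isdigit c)) = true := by
      rcases hpre with h | h
      · exact absurd h h0
      · exact h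
    simp only [get_next_num_in_line_starting_at_idx, get_next_num_in_line_starting_at_idx_alt]
    have hg : ¬ (start_idx > ((line.toList.length : Nat) : Int) - 1) := by omega
    rw [if_neg hg, if_neg hg]
    have hall : ∀ c ∈ PySem.List.slice line.toList (some start_idx) none,
        PySem.Chars.isdigit c = false := by
      intro c hc
      have hmem := PySem.List.mem_of_mem_slice line.toList (some start_idx) none hc
      simpa using List.all_eq_true.mp hnd c hmem
    have hnone : (PySem.List.slice line.toList (some start_idx) none).findIdx?
        (fun c => PySem.Chars.isdigit c) = none := by
      rw [List.findIdx?_eq_none_iff]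
      intro c hc
      simp [hall c hc]
    rw [pvALoop_nodigit line.toList start_idx _ 0 0 hall, hnone]
    simp
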